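-- pv_equiv track=rewrite | github.com/hconkov/hackbulgaria | week0/hard/09.py | fibolist
-- ===== SOURCE A (Python) =====
-- def fibolist(lista, listb, n):
--     listc = []
--     if n == 1:
--         return (lista)
--     elif n == 2:
--         return (listb)
--     else:
--         for i in range(3, n + 1):
--             listc = lista + listb
--             lista = listb
--             listb = listc
--     return(listc)
-- ===== SOURCE B (Python) =====
-- def fibolist(lista, listb, n):
--     if n == 1:
--         return lista
--     if n == 2:
--         return listb
--     if n < 3:
--         return []
--     return fibolist(lista, listb, n - 2) + fibolist(lista, listb, n - 1)
-- ===== Notes on version B (the rewrite author's own statement) =====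
-- stated objective: alternative
-- what changed: B realises the recurrence f(k)=f(k-2)+f(k-1) as naive top-down double recursion with base cases, replacing A's bottom-up loop that carries two rolling list variables.
import Mathlib
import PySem

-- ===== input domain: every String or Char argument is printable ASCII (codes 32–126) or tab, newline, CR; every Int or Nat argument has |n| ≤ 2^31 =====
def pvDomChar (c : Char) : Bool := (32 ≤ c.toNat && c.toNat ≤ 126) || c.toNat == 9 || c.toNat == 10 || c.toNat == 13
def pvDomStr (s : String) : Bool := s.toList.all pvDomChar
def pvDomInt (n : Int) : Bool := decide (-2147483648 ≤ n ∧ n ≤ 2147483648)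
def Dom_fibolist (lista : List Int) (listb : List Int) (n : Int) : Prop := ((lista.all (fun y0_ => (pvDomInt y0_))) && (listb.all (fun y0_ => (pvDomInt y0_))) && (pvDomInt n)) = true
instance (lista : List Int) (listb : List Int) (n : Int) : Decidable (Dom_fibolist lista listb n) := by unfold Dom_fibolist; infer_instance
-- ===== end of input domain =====

-- B realises the recurrence f(k)=f(k-2)+f(k-1) as naive top-down double recursion with base cases,
-- replacing A's bottom-up loop carrying two rolling list variables (objective: alternative).

-- ===== PORT A =====
def fibolist (lista : List Int) (listb : List Int) (n : Int) : List Int :=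
  let listc : List Int := []
  if n == 1 then lista
  else if n == 2 then listb
  else
    -- for i in range(3, n+1): listc = lista + listb; lista = listb; listb = listc
    let st := (PySem.List.pyRange 3 (n + 1) 1).foldl
      (fun (s : List Int × List Int × List Int) _ =>
        (s.2.1, s.1 ++ s.2.1, s.1 ++ s.2.1)) (lista, listb, listc)
    st.2.2

-- ===== PORT B =====
def fibolist_alt (lista : List Int) (listb : List Int) (n : Int) : List Int :=
  if n == 1 then lista
  else if n == 2 then listb
  else if n < 3 then []
  else fibolist_alt lista listb (n - 2) ++ fibolist_alt lista listb (n - 1)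
termination_by n.toNat
decreasing_by all_goals omega

-- ===== PRECONDITION & SPEC =====
def Spec_fibolist (lista : List Int) (listb : List Int) (n : Int) (out : List Int) : Prop := out = fibolist_alt lista listb n
instance (lista : List Int) (listb : List Int) (n : Int) (out : List Int) : Decidable (Spec_fibolist lista listb n out) := by unfold Spec_fibolist; infer_instance

-- ===== CLAIM (what is proved, stated in full; the proofs are below) =====
def Claim_equal_fibolist : Prop := ∀ (lista : List Int) (listb : List Int) (n : Int), Dom_fibolist lista listb n → Spec_fibolist lista listb n (fibolist lista listb n)

-- ===== LEMMAS AND PROOFS =====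

-- A's loop step on the state triple (lista, listb, listc)
def pvStep (s : List Int × List Int × List Int) : List Int × List Int × List Int :=
  (s.2.1, s.1 ++ s.2.1, s.1 ++ s.2.1)

theorem pv_foldl_const {α β : Type} (g : α → α) (l : List β) (s : α) :
    List.foldl (fun a _ => g a) s l = g^[l.length] s := by
  induction l generalizing s with
  | nil => rfl
  | cons x xs ih => simp [List.foldl, ih, Function.iterate_succ_apply]

-- B's recursion unfolds on the recursive case
theorem pv_alt_rec (lista listb : List Int) (n : Int) (h : 3 ≤ n) :
    fibolist_alt lista listb n =
      fibolist_alt lista listb (n - 2) ++ fibolist_alt lista listb (n - 1) := by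
  rw [fibolist_alt]
  have h1 : ¬ (n == 1) = true := by simp; omega
  have h2 : ¬ (n == 2) = true := by simp; omega
  have h3 : ¬ n < 3 := by omega
  simp [h1, h2, h3]

-- loop invariant: after k steps A's first two state components are B's values at k+1 and k+2
theorem pv_inv (lista listb : List Int) (k : Nat) :
    (pvStep^[k] (lista, listb, [])).1 = fibolist_alt lista listb ((k : Int) + 1) ∧
    (pvStep^[k] (lista, listb, [])).2.1 = fibolist_alt lista listb ((k : Int) + 2) := by
  induction k with
  | zero =>
      constructor
      · rw [fibolist_alt]; simp
      · rw [fibolist_alt]; simp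
  | succ k ih =>
      rw [Function.iterate_succ_apply']
      refine ⟨?_, ?_⟩
      · show (pvStep^[k] (lista, listb, [])).2.1 = _
        rw [ih.2]; congr 1
      · show (pvStep^[k] (lista, listb, [])).1 ++ (pvStep^[k] (lista, listb, [])).2.1 = _
        have hc : ((k + 1 : Nat) : Int) + 2 = (k : Int) + 3 := by push_cast; ring
        rw [ih.1, ih.2, hc, pv_alt_rec lista listb ((k : Int) + 3) (by omega)]
        congr 2 <;> omega

-- ===== VERDICT (by name: the statement is the Claim_ definition above) =====
theorem fibolist_spec : Claim_equal_fibolist := by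
  unfold Claim_equal_fibolist
  intro lista listb n _
  unfold Spec_fibolist
  unfold fibolist
  by_cases h1 : n = 1
  · subst h1; rw [fibolist_alt]; simp
  by_cases h2 : n = 2
  · subst h2; rw [fibolist_alt]; simp
  simp only [beq_iff_eq, h1, h2, if_false]
  have hstep : (fun (s : List Int × List Int × List Int) (_ : Int) =>
        (s.2.1, s.1 ++ s.2.1, s.1 ++ s.2.1)) = (fun a _ => pvStep a) := rfl
  rw [hstep, pv_foldl_const, PySem.List.length_pyRange_one]
  by_cases h3 : 3 ≤ n
  · obtain ⟨k, hk⟩ : ∃ k : Nat, (n + 1 - 3).toNat = k + 1 := ⟨(n + 1 - 3).toNat - 1, by omega⟩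
    rw [hk, Function.iterate_succ_apply']
    show (pvStep^[k] (lista, listb, [])).1 ++ (pvStep^[k] (lista, listb, [])).2.1 = _
    rw [(pv_inv lista listb k).1, (pv_inv lista listb k).2,
        pv_alt_rec lista listb n h3]
    congr 2 <;> omega
  · have : (n + 1 - 3).toNat = 0 := by omega
    rw [this]
    rw [fibolist_alt]
    have e1 : ¬ (n == 1) = true := by simp; omega
    have e2 : ¬ (n == 2) = true := by simp; omega
    have e3 : n < 3 := by omega
    simp [e1, e2, e3]
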